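-- pv_equiv track=rewrite | github.com/ZhangCheng-zh/blog | blog_all_python_combined.py | triggerCountError
-- ===== SOURCE A (Python) =====
-- from collections import defaultdict
-- from collections import defaultdict, deque
-- from collections import defaultdict
-- from collections import deque
-- from collections import defaultdict
-- from collections import defaultdict
-- from collections import defaultdict
-- from collections import defaultdict
-- from collections import defaultdict
-- from collections import defaultdict
-- from collections import defaultdict
-- from collections import defaultdict, deque
-- from collections import defaultdict, deque
-- from collections import defaultdict, deque
-- from collections import defaultdict, deque
-- from collections import defaultdict
-- from collections import defaultdict
-- from collections import Counter, defaultdict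
-- from collections import defaultdict
-- from collections import defaultdict, deque
-- from collections import defaultdict
-- from collections import defaultdict
-- from collections import defaultdict
--
-- def triggerCountError(edges, entry):
--     g = defaultdict(list)
--     for u, v in edges:
--         g[u].append(v)
--
--     count = defaultdict(int)
--     count[entry] = 1
--
--
--     # start bfs
--     q = deque([entry])
--     visited = set([entry])
--
--     while q:
--         u = q.popleft()
--         for v in g[u]:
--             count[v] += count[u]
--             if v not in visited:
--                 visited.add(v)
--                 q.append(v)
--
--     return count
-- ===== SOURCE B (Python) =====
-- from collections import defaultdict
--
-- def triggerCountError(edges, entry):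
--     g = defaultdict(list)
--     for u, v in edges:
--         g[u].append(v)
--
--     # phase 1: level-synchronous BFS with frontier lists (no deque), recording pop order
--     order = []
--     visited = {entry}
--     frontier = [entry]
--     while frontier:
--         nxt = []
--         for u in frontier:
--             order.append(u)
--             for v in g[u]:
--                 if v not in visited:
--                     visited.add(v)
--                     nxt.append(v)
--         frontier = nxt
--
--     # phase 2: replay the recorded order, accumulating counts along edges
--     count = defaultdict(int)
--     count[entry] = 1
--     for u in order:
--         for v in g[u]:
--             count[v] += count[u]
--     return count
-- ===== Notes on version B (the rewrite author's own statement) =====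
-- stated objective: alternative
-- what changed: Replaced A's single interleaved deque-BFS-with-counting by a level-synchronous BFS over frontier lists that only records pop order, followed by a separate replay pass over that order accumulating the counts; valid because pop order is count-independent and queue pop order equals level order.
import Mathlib
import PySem

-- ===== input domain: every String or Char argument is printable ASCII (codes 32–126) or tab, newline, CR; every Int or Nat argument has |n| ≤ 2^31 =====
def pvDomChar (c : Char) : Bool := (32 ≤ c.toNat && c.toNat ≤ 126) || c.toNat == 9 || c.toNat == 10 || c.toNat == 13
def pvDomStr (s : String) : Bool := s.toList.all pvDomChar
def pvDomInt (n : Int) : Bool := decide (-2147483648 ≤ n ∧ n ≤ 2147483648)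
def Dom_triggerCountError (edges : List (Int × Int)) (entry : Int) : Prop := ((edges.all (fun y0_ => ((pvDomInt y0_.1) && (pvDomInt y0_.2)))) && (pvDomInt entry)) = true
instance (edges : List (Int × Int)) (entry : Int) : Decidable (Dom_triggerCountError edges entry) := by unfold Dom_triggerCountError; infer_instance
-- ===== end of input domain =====

-- B replaces A's single interleaved deque-BFS-with-counting by a level-synchronous BFS over
-- frontier lists recording only the pop order, followed by a replay pass accumulating the
-- counts (objective: alternative decomposition, same cost).
-- Both loops are fueled: edges.length + 1 bounds the number of BFS pops (every node popped
-- beyond the entry is a distinct, newly-visited edge target), so each fueled loop computes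
-- exactly what its Python while-loop computes.

-- ===== PORT A =====
-- while q: u = q.popleft(); for v in g[u]: count[v] += count[u]; if v not in visited: add v, append v
def pvBfsA (g : PySem.Dict Int (List Int)) :
    Nat → List Int → PySem.Set Int → PySem.Dict Int Int → PySem.Dict Int Int
  | 0, _, _, count => count
  | _ + 1, [], _, count => count
  | fuel + 1, u :: q, visited, count =>
    let st := (g.getD u []).foldl
      (fun (s : PySem.Dict Int Int × PySem.Set Int × List Int) v =>
        let c := s.1.insert v (s.1.getD v 0 + s.1.getD u 0)
        if PySem.Set.contains s.2.1 v then (c, s.2.1, s.2.2)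
        else (c, PySem.Set.add s.2.1 v, s.2.2 ++ [v]))
      (count, visited, q)
    pvBfsA g fuel st.2.2 st.2.1 st.1

def triggerCountError (edges : List (Int × Int)) (entry : Int) : List (Int × Int) :=
  let g := edges.foldl (fun d p => d.modify p.1 [] (· ++ [p.2])) PySem.Dict.empty
  let count := (PySem.Dict.empty : PySem.Dict Int Int).insert entry 1
  (pvBfsA g (edges.length + 1) [entry] (PySem.Set.ofList [entry]) count).items

-- ===== PORT B =====
-- phase 1: level-synchronous BFS; state = (current frontier, next frontier being built);
-- the swap case (frontier exhausted, next nonempty) is Python's `frontier = nxt` step.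
def pvLevelOrder (g : PySem.Dict Int (List Int)) :
    Nat → List Int → List Int → PySem.Set Int → List Int
  | 0, _, _, _ => []
  | _ + 1, [], [], _ => []
  | fuel + 1, [], m :: nxt, visited => pvLevelOrder g (fuel + 1) (m :: nxt) [] visited
  | fuel + 1, u :: f, nxt, visited =>
    let st := (g.getD u []).foldl
      (fun (s : PySem.Set Int × List Int) v =>
        if PySem.Set.contains s.1 v then s
        else (PySem.Set.add s.1 v, s.2 ++ [v]))
      (visited, nxt)
    u :: pvLevelOrder g fuel f st.2 st.1
termination_by fuel _ nxt _ => (fuel, nxt.length)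

def triggerCountError_alt (edges : List (Int × Int)) (entry : Int) : List (Int × Int) :=
  let g := edges.foldl (fun d p => d.modify p.1 [] (· ++ [p.2])) PySem.Dict.empty
  let order := pvLevelOrder g (edges.length + 1) [entry] [] (PySem.Set.ofList [entry])
  -- phase 2: replay the recorded order, accumulating counts along edges
  let count := (PySem.Dict.empty : PySem.Dict Int Int).insert entry 1
  (order.foldl
    (fun c u => (g.getD u []).foldl
      (fun (c : PySem.Dict Int Int) v => c.insert v (c.getD v 0 + c.getD u 0)) c)
    count).items

-- ===== PRECONDITION & SPEC =====
def Spec_triggerCountError (edges : List (Int × Int)) (entry : Int) (out : List (Int × Int)) : Prop := out = triggerCountError_alt edges entry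
instance (edges : List (Int × Int)) (entry : Int) (out : List (Int × Int)) : Decidable (Spec_triggerCountError edges entry out) := by unfold Spec_triggerCountError; infer_instance

-- ===== CLAIM (what is proved, stated in full; the proofs are below) =====
def Claim_equal_triggerCountError : Prop := ∀ (edges : List (Int × Int)) (entry : Int), Dom_triggerCountError edges entry → Spec_triggerCountError edges entry (triggerCountError edges entry)

-- ===== LEMMAS AND PROOFS =====

-- Proof-side helper: the pop order of A's queue-based BFS.
def pvQOrder (g : PySem.Dict Int (List Int)) :
    Nat → List Int → PySem.Set Int → List Int
  | 0, _, _ => []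
  | _ + 1, [], _ => []
  | fuel + 1, u :: q, visited =>
    let st := (g.getD u []).foldl
      (fun (s : PySem.Set Int × List Int) v =>
        if PySem.Set.contains s.1 v then s
        else (PySem.Set.add s.1 v, s.2 ++ [v]))
      (visited, q)
    u :: pvQOrder g fuel st.2 st.1

-- A's interleaved inner fold over g[u] splits into the count-only fold and the visited/queue-only fold.
theorem pvInnerSplit (u : Int) (l : List Int)
    (count : PySem.Dict Int Int) (visited : PySem.Set Int) (q : List Int) :
    l.foldl
      (fun (s : PySem.Dict Int Int × PySem.Set Int × List Int) v =>
        let c := s.1.insert v (s.1.getD v 0 + s.1.getD u 0)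
        if PySem.Set.contains s.2.1 v then (c, s.2.1, s.2.2)
        else (c, PySem.Set.add s.2.1 v, s.2.2 ++ [v]))
      (count, visited, q)
    = (l.foldl (fun (c : PySem.Dict Int Int) v => c.insert v (c.getD v 0 + c.getD u 0)) count,
       l.foldl (fun (s : PySem.Set Int × List Int) v =>
         if PySem.Set.contains s.1 v then s
         else (PySem.Set.add s.1 v, s.2 ++ [v])) (visited, q)) := by
  induction l generalizing count visited q with
  | nil => rfl
  | cons v l ih =>
    simp only [List.foldl]
    split_ifs <;> exact ih _ _ _

-- The counting BFS equals the order-only queue BFS followed by the count replay.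
theorem pvBfsA_eq_replay (g : PySem.Dict Int (List Int)) (fuel : Nat) :
    ∀ (q : List Int) (visited : PySem.Set Int) (count : PySem.Dict Int Int),
    pvBfsA g fuel q visited count
      = (pvQOrder g fuel q visited).foldl
          (fun c u => (g.getD u []).foldl
            (fun (c : PySem.Dict Int Int) v => c.insert v (c.getD v 0 + c.getD u 0)) c)
          count := by
  induction fuel with
  | zero => intro q visited count; rfl
  | succ fuel ih =>
    intro q visited count
    cases q with
    | nil => rfl
    | cons u q =>
      simp only [pvBfsA, pvQOrder, pvInnerSplit, List.foldl]
      exact ih _ _ _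

-- The visited/next inner fold only appends at the tail: a prefix of the list component passes through.
theorem pvStepAppend (l : List Int) (visited : PySem.Set Int) (f n : List Int) :
    l.foldl (fun (s : PySem.Set Int × List Int) v =>
        if PySem.Set.contains s.1 v then s
        else (PySem.Set.add s.1 v, s.2 ++ [v])) (visited, f ++ n)
    = ((l.foldl (fun (s : PySem.Set Int × List Int) v =>
        if PySem.Set.contains s.1 v then s
        else (PySem.Set.add s.1 v, s.2 ++ [v])) (visited, n)).1,
       f ++ (l.foldl (fun (s : PySem.Set Int × List Int) v =>
        if PySem.Set.contains s.1 v then s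
        else (PySem.Set.add s.1 v, s.2 ++ [v])) (visited, n)).2) := by
  induction l generalizing visited n with
  | nil => rfl
  | cons v l ih =>
    simp only [List.foldl]
    split_ifs
    · exact ih _ _
    · rw [List.append_assoc]; exact ih _ _

-- Level-synchronous pop order equals queue pop order.
theorem pvLevel_eq_queue (g : PySem.Dict Int (List Int)) :
    ∀ (fuel : Nat) (f n : List Int) (visited : PySem.Set Int),
    pvLevelOrder g fuel f n visited = pvQOrder g fuel (f ++ n) visited := by
  intro fuel f n visited
  induction fuel, f, n, visited using pvLevelOrder.induct g with
  | case1 => simp [pvLevelOrder, pvQOrder]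
  | case2 => simp [pvLevelOrder, pvQOrder]
  | case3 fuel m nxt visited ih =>
      rw [pvLevelOrder, ih]; simp
  | case4 fuel u f nxt visited st ih =>
      rw [pvLevelOrder]
      simp only [List.cons_append, pvQOrder, pvStepAppend]
      exact congrArg (List.cons u) ih

-- ===== VERDICT (by name: the statement is the Claim_ definition above) =====
theorem triggerCountError_spec : Claim_equal_triggerCountError := by
  intro edges entry _
  unfold Spec_triggerCountError triggerCountError triggerCountError_alt
  simp only [pvBfsA_eq_replay, pvLevel_eq_queue, List.append_nil]
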